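-- pv_equiv track=rewrite | github.com/uchebnick/unch-searcher | scripts/render_release_announcement.py | render_announcement
-- ===== SOURCE A (Python) =====
-- def strip_markdown(text: str) -> str:
--     return " ".join(text.replace("`", "").split())
--
-- def extract_title(lines: list[str], tag: str) -> str:
--     for line in lines:
--         if line.startswith("# "):
--             return strip_markdown(line[2:].strip())
--     return f"unch {tag}"
--
-- def extract_summary(lines: list[str]) -> str:
--     body = lines[:]
--     if body and body[0].startswith("# "):
--         body = body[1:]
--
--     paragraph: list[str] = []
--     for line in body:
--         stripped = line.strip()
--         if not stripped:
--             if paragraph: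
--                 break
--             continue
--         if stripped.startswith("## "):
--             break
--         paragraph.append(stripped)
--
--     return strip_markdown(" ".join(paragraph))
--
-- def extract_section_bullets(lines: list[str], heading: str) -> list[str]:
--     target = f"## {heading}"
--     in_section = False
--     bullets: list[str] = []
--
--     for line in lines:
--         stripped = line.strip()
--         if stripped == target:
--             in_section = True
--             continue
--         if in_section and stripped.startswith("## "):
--             break
--         if in_section and stripped.startswith("- "):
--             bullets.append(strip_markdown(stripped[2:]))
--
--     return bullets
--
-- def render_announcement(tag: str, url: str, notes_text: str) -> str:
--     lines = notes_text.splitlines()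
--     title = extract_title(lines, tag)
--     summary = extract_summary(lines)
--     highlights = extract_section_bullets(lines, "Highlights")
--     upgrades = extract_section_bullets(lines, "Upgrade notes")
--
--     rendered: list[str] = [title]
--
--     if summary:
--         rendered.extend(["", summary])
--
--     if highlights:
--         rendered.extend(["", "Highlights:"])
--         rendered.extend(f"- {item}" for item in highlights)
--
--     if upgrades:
--         rendered.extend(["", "Upgrade notes:"])
--         rendered.extend(f"- {item}" for item in upgrades)
--
--     rendered.extend(["", f"Release: {url}"])
--     return "\n".join(rendered)
-- ===== SOURCE B (Python) =====
-- # Single combined pass over the lines (title / summary / both bullet sections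
-- # tracked by per-concern state) instead of A's four separate scans.
--
-- def strip_markdown(text: str) -> str:
--     return " ".join(text.replace("`", "").split())
--
-- def _section_step(state, bullets, stripped, target):
--     # state: 0 = before heading, 1 = inside section, 2 = section finished
--     if state == 2:
--         return 2
--     if stripped == target:
--         return 1
--     if state == 1:
--         if stripped.startswith("## "):
--             return 2
--         if stripped.startswith("- "):
--             bullets.append(strip_markdown(stripped[2:]))
--     return state
--
-- def render_announcement(tag: str, url: str, notes_text: str) -> str:
--     title = None
--     parts: list[str] = []
--     parts_done = False
--     highlights: list[str] = []
--     upgrades: list[str] = []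
--     h_state = 0
--     u_state = 0
--     first = True
--
--     for line in notes_text.splitlines():
--         stripped = line.strip()
--         if title is None and line.startswith("# "):
--             title = strip_markdown(line[2:].strip())
--         if not (first and line.startswith("# ")) and not parts_done:
--             if not stripped:
--                 if parts:
--                     parts_done = True
--             elif stripped.startswith("## "):
--                 parts_done = True
--             else:
--                 parts.append(stripped)
--         h_state = _section_step(h_state, highlights, stripped, "## Highlights")
--         u_state = _section_step(u_state, upgrades, stripped, "## Upgrade notes")
--         first = False
--
--     if title is None:
--         title = f"unch {tag}"
--     summary = strip_markdown(" ".join(parts))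
--
--     rendered = [title]
--     if summary:
--         rendered.extend(["", summary])
--     if highlights:
--         rendered.extend(["", "Highlights:"])
--         rendered.extend(f"- {item}" for item in highlights)
--     if upgrades:
--         rendered.extend(["", "Upgrade notes:"])
--         rendered.extend(f"- {item}" for item in upgrades)
--     rendered.extend(["", f"Release: {url}"])
--     return "\n".join(rendered)
-- ===== Notes on version B (the rewrite author's own statement) =====
-- stated objective: alternative
-- what changed: A scans the line list four separate times (title, summary, two bullet sections); B makes one combined pass over the lines maintaining per-concern state (title option, summary accumulator with done flag, a 3-state machine per bullet section) and assembles the same output blocks.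
import Mathlib
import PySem

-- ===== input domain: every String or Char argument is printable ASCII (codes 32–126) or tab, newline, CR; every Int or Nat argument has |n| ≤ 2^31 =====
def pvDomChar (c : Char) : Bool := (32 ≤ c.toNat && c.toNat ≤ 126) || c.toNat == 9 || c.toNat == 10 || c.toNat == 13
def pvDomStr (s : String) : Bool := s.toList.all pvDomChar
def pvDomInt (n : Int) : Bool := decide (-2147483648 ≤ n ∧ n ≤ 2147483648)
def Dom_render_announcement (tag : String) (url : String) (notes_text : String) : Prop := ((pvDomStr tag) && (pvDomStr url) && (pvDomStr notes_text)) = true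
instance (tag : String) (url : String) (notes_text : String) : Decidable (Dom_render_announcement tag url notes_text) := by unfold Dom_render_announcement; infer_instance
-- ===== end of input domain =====

-- B replaces A's four separate scans of the lines by a single combined pass with
-- per-concern state (objective: alternative decomposition, same asymptotic cost).

-- ===== PORT A =====
def strip_markdown (text : String) : String :=
  PySem.Str.join " " (PySem.Str.split₀ (PySem.Str.replace text "`" ""))

def extract_title : List String → String → String
  | [], tag => "unch " ++ tag
  | line :: rest, tag =>
    if PySem.Str.startswith line "# " then
      strip_markdown (PySem.Str.strip (PySem.Str.slice line (some 2) none))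
    else extract_title rest tag

def summary_loop : List String → List String → List String
  | [], paragraph => paragraph
  | line :: rest, paragraph =>
    let stripped := PySem.Str.strip line
    if stripped = "" then
      (if paragraph = [] then summary_loop rest paragraph else paragraph)
    else if PySem.Str.startswith stripped "## " then paragraph
    else summary_loop rest (paragraph ++ [stripped])

def extract_summary (lines : List String) : String :=
  let body : List String := match lines with
    | [] => lines
    | l :: rest => if PySem.Str.startswith l "# " then rest else lines
  strip_markdown (PySem.Str.join " " (summary_loop body []))

def section_loop (target : String) : List String → Bool → List String → List String
  | [], _, bullets => bullets
  | line :: rest, in_section, bullets =>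
    let stripped := PySem.Str.strip line
    if stripped = target then section_loop target rest true bullets
    else if in_section && PySem.Str.startswith stripped "## " then bullets
    else if in_section && PySem.Str.startswith stripped "- " then
      section_loop target rest in_section
        (bullets ++ [strip_markdown (PySem.Str.slice stripped (some 2) none)])
    else section_loop target rest in_section bullets

def extract_section_bullets (lines : List String) (heading : String) : List String :=
  section_loop ("## " ++ heading) lines false []

def render_announcement (tag : String) (url : String) (notes_text : String) : String :=
  let lines := PySem.Str.splitlines notes_text
  let title := extract_title lines tag
  let summary := extract_summary lines
  let highlights := extract_section_bullets lines "Highlights"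
  let upgrades := extract_section_bullets lines "Upgrade notes"
  let rendered : List String := [title]
  let rendered := if summary ≠ "" then rendered ++ ["", summary] else rendered
  let rendered := if highlights ≠ [] then
      rendered ++ ["", "Highlights:"] ++ highlights.map (fun item => "- " ++ item)
    else rendered
  let rendered := if upgrades ≠ [] then
      rendered ++ ["", "Upgrade notes:"] ++ upgrades.map (fun item => "- " ++ item)
    else rendered
  let rendered := rendered ++ ["", "Release: " ++ url]
  PySem.Str.join "\n" rendered

-- ===== PORT B =====
-- state: 0 = before the heading, 1 = inside the section, 2 = section finished
def section_step (state : Nat) (bullets : List String) (stripped target : String) :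
    Nat × List String :=
  if state = 2 then (2, bullets)
  else if stripped = target then (1, bullets)
  else if state = 1 then
    (if PySem.Str.startswith stripped "## " then (2, bullets)
     else if PySem.Str.startswith stripped "- " then
       (state, bullets ++ [strip_markdown (PySem.Str.slice stripped (some 2) none)])
     else (state, bullets))
  else (state, bullets)

def scan_loop : List String → Bool → Option String → Bool → List String → Nat → List String →
    Nat → List String → Option String × List String × List String × List String
  | [], _, title, _, parts, _, highlights, _, upgrades => (title, parts, highlights, upgrades)
  | line :: rest, first, title, parts_done, parts, h_state, highlights, u_state, upgrades =>
    let stripped := PySem.Str.strip line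
    let title := if title.isNone && PySem.Str.startswith line "# " then
        some (strip_markdown (PySem.Str.strip (PySem.Str.slice line (some 2) none)))
      else title
    let sres : Bool × List String :=
      if !(first && PySem.Str.startswith line "# ") && !parts_done then
        (if stripped = "" then (if parts ≠ [] then (true, parts) else (parts_done, parts))
         else if PySem.Str.startswith stripped "## " then (true, parts)
         else (parts_done, parts ++ [stripped]))
      else (parts_done, parts)
    let hres := section_step h_state highlights stripped "## Highlights"
    let ures := section_step u_state upgrades stripped "## Upgrade notes"
    scan_loop rest false title sres.1 sres.2 hres.1 hres.2 ures.1 ures.2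

def render_announcement_alt (tag : String) (url : String) (notes_text : String) : String :=
  let res := scan_loop (PySem.Str.splitlines notes_text) true none false [] 0 [] 0 []
  let title := res.1.getD ("unch " ++ tag)
  let summary := strip_markdown (PySem.Str.join " " res.2.1)
  let highlights := res.2.2.1
  let upgrades := res.2.2.2
  let rendered : List String := [title]
  let rendered := if summary ≠ "" then rendered ++ ["", summary] else rendered
  let rendered := if highlights ≠ [] then
      rendered ++ ["", "Highlights:"] ++ highlights.map (fun item => "- " ++ item)
    else rendered
  let rendered := if upgrades ≠ [] then
      rendered ++ ["", "Upgrade notes:"] ++ upgrades.map (fun item => "- " ++ item)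
    else rendered
  let rendered := rendered ++ ["", "Release: " ++ url]
  PySem.Str.join "\n" rendered

-- ===== PRECONDITION & SPEC =====
def Spec_render_announcement (tag : String) (url : String) (notes_text : String) (out : String) : Prop := out = render_announcement_alt tag url notes_text
instance (tag : String) (url : String) (notes_text : String) (out : String) : Decidable (Spec_render_announcement tag url notes_text out) := by unfold Spec_render_announcement; infer_instance

-- ===== CLAIM (what is proved, stated in full; the proofs are below) =====
def Claim_equal_render_announcement : Prop := ∀ (tag : String) (url : String) (notes_text : String), Dom_render_announcement tag url notes_text → Spec_render_announcement tag url notes_text (render_announcement tag url notes_text)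

-- ===== LEMMAS AND PROOFS =====

-- first '# ' title of the line list, as an Option (proof-side characterisation)
def titleOpt : List String → Option String
  | [] => none
  | line :: rest =>
    if PySem.Str.startswith line "# " then
      some (strip_markdown (PySem.Str.strip (PySem.Str.slice line (some 2) none)))
    else titleOpt rest

-- what the per-section state of B's pass denotes in terms of A's section_loop
def secComp (target : String) (state : Nat) (bullets : List String) (ls : List String) :
    List String :=
  match state with
  | 1 => section_loop target ls true bullets
  | 2 => bullets
  | _ => section_loop target ls false bullets

lemma extract_title_eq (ls : List String) (tag : String) :
    extract_title ls tag = (titleOpt ls).getD ("unch " ++ tag) := by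
  induction ls with
  | nil => rfl
  | cons l rest ih =>
    simp only [extract_title, titleOpt]
    split_ifs with h
    · rfl
    · exact ih

lemma secComp_step (target line : String) (rest : List String) (hs : Nat) (hb : List String) :
    secComp target (section_step hs hb (PySem.Str.strip line) target).1
        (section_step hs hb (PySem.Str.strip line) target).2 rest
      = secComp target hs hb (line :: rest) := by
  rcases hs with _ | _ | _ | n <;>
    · simp only [secComp, section_step, section_loop]
      split_ifs <;> first | rfl | omega | simp_all

lemma scan_loop_spec (ls : List String) : ∀ (t : Option String) (pd : Bool)
    (ps : List String) (hs : Nat) (hb : List String) (us : Nat) (ub : List String),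
    scan_loop ls false t pd ps hs hb us ub =
      ((match t with | some x => some x | none => titleOpt ls),
       (if pd then ps else summary_loop ls ps),
       secComp "## Highlights" hs hb ls,
       secComp "## Upgrade notes" us ub ls) := by
  induction ls with
  | nil =>
    intro t pd ps hs hb us ub
    cases t <;> cases pd <;> rcases hs with _ | _ | _ | n <;> rcases us with _ | _ | _ | m <;> rfl
  | cons l rest ih =>
    intro t pd ps hs hb us ub
    rw [scan_loop, ih, secComp_step, secComp_step]
    refine congrArg₂ Prod.mk ?_ (congrArg₂ Prod.mk ?_ rfl)
    · cases t with
      | some x => rfl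
      | none =>
        simp only [Option.isNone_none, Bool.true_and, titleOpt]
        split_ifs with h <;> rfl
    · cases pd with
      | true => rfl
      | false =>
        simp only [Bool.false_and, Bool.not_false, Bool.and_true, if_true,
          summary_loop]
        split_ifs <;> first | rfl | simp_all

lemma scan_loop_top (lines : List String) :
    scan_loop lines true none false [] 0 [] 0 [] =
      (titleOpt lines,
       summary_loop (match lines with
         | [] => lines
         | l :: rest => if PySem.Str.startswith l "# " then rest else lines) [],
       section_loop "## Highlights" lines false [],
       section_loop "## Upgrade notes" lines false []) := by
  cases lines with
  | nil => rfl
  | cons l rest =>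
    rw [scan_loop, scan_loop_spec, secComp_step, secComp_step]
    refine congrArg₂ Prod.mk ?_ (congrArg₂ Prod.mk ?_ rfl)
    · simp only [Option.isNone_none, Bool.true_and, titleOpt]
      split_ifs with h <;> rfl
    · by_cases h : PySem.Str.startswith l "# " = true
      · simp only [h]
        rfl
      · simp only [Bool.not_eq_true] at h
        simp only [h, Bool.not_false, Bool.true_and, if_true]
        conv_rhs => rw [summary_loop.eq_def]
        split_ifs <;> first | rfl | simp_all

-- ===== VERDICT (by name: the statement is the Claim_ definition above) =====
theorem render_announcement_spec : Claim_equal_render_announcement := by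
  intro tag url notes_text _
  unfold Spec_render_announcement
  simp only [render_announcement, render_announcement_alt, extract_summary,
    extract_section_bullets, extract_title_eq, scan_loop_top]
  rfl
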